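-- pv_equiv track=rewrite | github.com/srithedesigner/LeetVaishnav | 936-stamping-the-sequence/936-stamping-the-sequence.py | movesToStamp
-- ===== SOURCE A (Python) =====
-- from typing import List
--
-- def movesToStamp(stamp: str, target: str) -> List[int]:
--
--
--
--     ans = []
--
--     n = len(stamp)
--     m = len(target)
--
--     stamp, target = list(stamp), list(target)
--
--     done = False
--
--     while not done:
--
--         done = True
--
--         for i in range(m - n + 1):
--
--             canStamp = False
--             for j in range(n):
--
--                 if target[i + j] == "?":
--                     continue
--
--                 if target[i+j] != stamp[j]:
--                     canStamp = False
--                     break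
--
--                 canStamp = True
--
--             if canStamp:
--
--                 for j in range(n):
--
--                     target[i+j] = "?"
--
--                 ans.append(i)
--
--                 done = False
--
--     return [] if target != ["?"]*m else ans[::-1]
-- ===== SOURCE B (Python) =====
-- from typing import List
--
-- def movesToStamp(stamp: str, target: str) -> List[int]:
--     # Event-driven worklist instead of repeated full scans: every window is
--     # scheduled at most once (the moment it first becomes stampable), into a
--     # sorted current-round or next-round worklist; after a stamp only the
--     # 2n-1 windows overlapping it are examined.  Scheduling a window into the
--     # current round iff it lies right of the enabling stamp reproduces the
--     # original left-to-right pass order, hence the exact same move list.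
--     n, m = len(stamp), len(target)
--     W = m - n + 1
--     t = list(target)
--
--     def ok(i: int) -> bool:
--         w = t[i:i + n]
--         return w != ['?'] * n and all(c == '?' or c == s for c, s in zip(w, stamp))
--
--     scheduled = [False] * max(W, 0)
--     cur = [i for i in range(W) if ok(i)]
--     for i in cur:
--         scheduled[i] = True
--     nxt: List[int] = []
--     order: List[int] = []
--     while cur or nxt:
--         if not cur:
--             cur, nxt = nxt, []
--             continue
--         i = cur.pop(0)
--         if ok(i):
--             t[i:i + n] = ['?'] * n
--             order.append(i)
--             for v in range(max(0, i - n + 1), min(W, i + n)):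
--                 if not scheduled[v] and ok(v):
--                     scheduled[v] = True
--                     if v > i:
--                         k = 0
--                         while k < len(cur) and cur[k] < v:
--                             k += 1
--                         cur.insert(k, v)
--                     else:
--                         k = 0
--                         while k < len(nxt) and nxt[k] < v:
--                             k += 1
--                         nxt.insert(k, v)
--     return order[::-1] if t == ['?'] * m else []
-- ===== Notes on version B (the rewrite author's own statement) =====
-- stated objective: alternative
-- what changed: A repeatedly rescans every window of the target pass after pass until a stampless pass; B never rescans: it runs an event-driven worklist in which each window is scheduled at most once (the moment it first becomes stampable) into a sorted current-round/next-round list, and after a stamp only the 2n-1 windows overlapping it are examined; scheduling right-of-stamp windows into the current round reproduces A's left-to-right pass order, so the returned move list is identical.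
import Mathlib
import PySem

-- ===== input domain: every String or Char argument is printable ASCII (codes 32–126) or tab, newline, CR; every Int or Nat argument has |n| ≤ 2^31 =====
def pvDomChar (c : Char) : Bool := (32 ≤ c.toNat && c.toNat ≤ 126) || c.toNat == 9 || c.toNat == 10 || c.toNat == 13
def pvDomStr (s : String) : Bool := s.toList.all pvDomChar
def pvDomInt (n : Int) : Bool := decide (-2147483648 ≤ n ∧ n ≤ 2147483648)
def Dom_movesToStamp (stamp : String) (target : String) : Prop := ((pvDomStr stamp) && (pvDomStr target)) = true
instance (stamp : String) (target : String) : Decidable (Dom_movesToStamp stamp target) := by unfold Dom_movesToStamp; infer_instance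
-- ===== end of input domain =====

-- B replaces A's repeated full scans over all windows by an event-driven worklist
-- (an alternative algorithm): every window is scheduled at most once (when it first
-- becomes stampable) into a sorted current-round/next-round worklist, and after a
-- stamp only the 2n-1 overlapping windows are examined; same pass order, same value.


-- number of characters ≠ '?': the termination measure behind both while-loops
-- (each stamp strictly decreases it; the chosen fuels are proved sufficient below)
def countNonQ (t : List Char) : Nat := t.countP (fun c => c ≠ '?')

-- ===== PORT A =====

-- inner 'for j in range(n): …' with break/continue computing canStamp
-- (indices i+j are always in range in A; pyGetD's default is never used)
def aCanLoop (s t : List Char) (i : Int) : List Int → Bool → Bool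
  | [], c => c
  | j :: js, c =>
      let ch := PySem.List.pyGetD t (i + j) '?'
      if ch = '?' then aCanLoop s t i js c
      else if ch ≠ PySem.List.pyGetD s j '?' then false
      else aCanLoop s t i js true

-- 'for j in range(n): target[i+j] = "?"'  (0 ≤ i and in-range throughout, so .toNat is exact)
def aStamp (t : List Char) (i : Int) : Nat → List Char
  | 0 => t
  | k + 1 => aStamp (t.set i.toNat '?') (i + 1) k

-- one pass of 'for i in range(m - n + 1): …' over state (target, ans, done)
def aPass (s : List Char) (n : Nat) : List Int → List Char × List Int × Bool → List Char × List Int × Bool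
  | [], st => st
  | i :: is, (t, ans, done) =>
      if aCanLoop s t i (PySem.List.pyRange 0 (n : Int)) false then
        aPass s n is (aStamp t i n, ans ++ [i], false)
      else
        aPass s n is (t, ans, done)

-- 'while not done:' as fuel recursion; fuel = countNonQ t + 1 is sufficient (proved below)
def aLoop (s : List Char) (n : Nat) (W : Int) : Nat → List Char → List Int → List Char × List Int
  | 0, t, ans => (t, ans)
  | f + 1, t, ans =>
      match aPass s n (PySem.List.pyRange 0 W) (t, ans, true) with
      | (t', ans', done) => if done then (t', ans') else aLoop s n W f t' ans'

def movesToStamp (stamp : String) (target : String) : List Int :=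
  let s := stamp.toList
  let t := target.toList
  let n := s.length
  let m := t.length
  let r := aLoop s n ((m : Int) - (n : Int) + 1) (countNonQ t + 1) t []
  if r.1 ≠ List.replicate m '?' then [] else r.2.reverse

-- ===== PORT B =====

-- "w != ['?']*n and all(c == '?' or c == s for c, s in zip(w, stamp))" with w = t[i:i+n]
def bCheck (s t : List Char) (i : Int) (n : Nat) : Bool :=
  let w := PySem.List.slice t (some i) (some (i + (n : Int)))
  (!decide (w = List.replicate n '?')) && (w.zip s).all (fun p => p.1 == '?' || p.1 == p.2)

-- slice assignment "t[i:i+n] = ['?'] * n"  (0 ≤ i and i+n ≤ len(t) always here, so exact)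
def bSplice (t : List Char) (i : Int) (n : Nat) : List Char :=
  t.take i.toNat ++ List.replicate n '?' ++ t.drop (i.toNat + n)

-- "k = 0; while k < len(l) and l[k] < v: k += 1; l.insert(k, v)"  (sorted insert)
def insSorted : List Int → Int → List Int
  | [], v => [v]
  | x :: xs, v => if x < v then x :: insSorted xs v else v :: x :: xs

-- "for v in range(max(0,i-n+1), min(W,i+n)): if not scheduled[v] and ok(v): …"
def bPush (s t : List Char) (n : Nat) (i : Int) :
    List Int → List Bool × List Int × List Int → List Bool × List Int × List Int
  | [], st => st
  | v :: vs, (sch, cur, nxt) =>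
      if sch.getD v.toNat false = false ∧ bCheck s t v n then
        bPush s t n i vs
          (sch.set v.toNat true,
           if i < v then insSorted cur v else cur,
           if i < v then nxt else insSorted nxt v)
      else
        bPush s t n i vs (sch, cur, nxt)

-- "while cur or nxt: if not cur: cur, nxt = nxt, []; continue; i = cur.pop(0); …"
-- (fuel recursion; the fuel chosen in movesToStamp_alt is proved sufficient below)
def bRun (s : List Char) (n : Nat) (W : Int) :
    Nat → List Char → List Bool → List Int → List Int → List Int → List Char × List Int
  | 0, t, _, _, _, order => (t, order)
  | f + 1, t, sch, cur, nxt, order =>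
      match cur, nxt with
      | [], [] => (t, order)
      | [], v :: vs => bRun s n W f t sch (v :: vs) [] order
      | i :: cur', nxt =>
          if bCheck s t i n then
            match bPush s (bSplice t i n) n i
                (PySem.List.pyRange (max 0 (i - (n : Int) + 1)) (min W (i + (n : Int))))
                (sch, cur', nxt) with
            | (sch', cur2, nxt2) => bRun s n W f (bSplice t i n) sch' cur2 nxt2 (order ++ [i])
          else bRun s n W f t sch cur' nxt order

def movesToStamp_alt (stamp : String) (target : String) : List Int :=
  let s := stamp.toList
  let t := target.toList
  let n := s.length
  let m := t.length
  let W : Int := (m : Int) - (n : Int) + 1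
  let cur0 := (PySem.List.pyRange 0 W).filter (fun i => bCheck s t i n)
  let sch0 := cur0.foldl (fun sch i => sch.set i.toNat true) (List.replicate (max W 0).toNat false)
  let r := bRun s n W (countNonQ t * (2 * n + 3) + cur0.length + 2) t sch0 cur0 [] []
  if r.1 = List.replicate m '?' then r.2.reverse else []

-- ===== PRECONDITION & SPEC =====
def Spec_movesToStamp (stamp : String) (target : String) (out : List Int) : Prop := out = movesToStamp_alt stamp target
instance (stamp : String) (target : String) (out : List Int) : Decidable (Spec_movesToStamp stamp target out) := by unfold Spec_movesToStamp; infer_instance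

-- ===== CLAIM (what is proved, stated in full; the proofs are below) =====
def Claim_equal_movesToStamp : Prop := ∀ (stamp : String) (target : String), Dom_movesToStamp stamp target → Spec_movesToStamp stamp target (movesToStamp stamp target)

-- ===== LEMMAS AND PROOFS =====

theorem getD_set_eq {α : Type} (l : List α) (a k : Nat) (v d : α) :
    (l.set a v).getD k d = if k = a ∧ a < l.length then v else l.getD k d := by
  simp [List.getD, List.getElem?_set]
  split_ifs with h1 h2 h3 h4 <;> simp_all

theorem getD_pos_lt_length {α : Type} [DecidableEq α] (l : List α) (k : Nat) (d : α)
    (h : l.getD k d ≠ d) : k < l.length := by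
  by_contra hc
  rw [List.getD, List.getElem?_eq_none (by omega : l.length ≤ k)] at h
  simp at h

theorem countNonQ_set_le (t : List Char) (a : Nat) : countNonQ (t.set a '?') ≤ countNonQ t := by
  by_cases h : a < t.length
  · simp [countNonQ, List.countP_set h]
  · rw [List.set_eq_of_length_le (by omega)]

theorem countNonQ_set_lt (t : List Char) (a : Nat) (h : t.getD a '?' ≠ '?') :
    countNonQ (t.set a '?') < countNonQ t := by
  have hl : a < t.length := getD_pos_lt_length t a '?' h
  rw [List.getD_eq_getElem t '?' hl] at h
  have hc : List.countP (fun c => decide ¬(c = '?')) (t.set a '?') =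
      (List.countP (fun c => decide ¬(c = '?')) t - if (¬(t[a] = '?') : Prop) then 1 else 0)
        + if (¬(('?' : Char) = '?') : Prop) then 1 else 0 := by
    simpa using List.countP_set (p := fun c => decide ¬(c = '?')) (l := t) (a := '?') hl
  have h1 : 1 ≤ List.countP (fun c => decide ¬(c = '?')) t := by
    rw [List.countP_eq_length_filter]
    have hm : t[a] ∈ t.filter (fun c => decide ¬(c = '?')) := by
      simp [List.mem_filter, List.getElem_mem hl, h]
    have := List.length_pos_of_mem hm
    omega
  simp only [countNonQ]
  simp only [ne_eq]
  rw [hc, if_pos h, if_neg (by simp)]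
  omega

theorem aStamp_le (t : List Char) (i : Int) (n : Nat) : countNonQ (aStamp t i n) ≤ countNonQ t := by
  induction n generalizing t i with
  | zero => simp [aStamp]
  | succ k ih =>
      calc countNonQ (aStamp t i (k+1)) = countNonQ (aStamp (t.set i.toNat '?') (i+1) k) := rfl
        _ ≤ countNonQ (t.set i.toNat '?') := ih _ _
        _ ≤ countNonQ t := countNonQ_set_le t i.toNat

theorem aStamp_lt (t : List Char) (i : Int) (n j : Nat) (hi : 0 ≤ i) (hj : j < n)
    (h : t.getD (i.toNat + j) '?' ≠ '?') : countNonQ (aStamp t i n) < countNonQ t := by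
  induction n generalizing t i j with
  | zero => omega
  | succ k ih =>
      show countNonQ (aStamp (t.set i.toNat '?') (i+1) k) < countNonQ t
      rcases Nat.eq_zero_or_pos j with hj0 | hj0
      · subst hj0
        simp at h
        calc countNonQ (aStamp (t.set i.toNat '?') (i+1) k) ≤ countNonQ (t.set i.toNat '?') :=
              aStamp_le _ _ _
          _ < countNonQ t := countNonQ_set_lt t i.toNat h
      · have hlt : countNonQ (aStamp (t.set i.toNat '?') (i+1) k) < countNonQ (t.set i.toNat '?') := by
          apply ih (t.set i.toNat '?') (i+1) (j-1) (by omega) (by omega)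
          rw [getD_set_eq]
          have hne : ¬((i+1).toNat + (j-1) = i.toNat ∧ i.toNat < t.length) := by
            intro ⟨h1, _⟩; omega
          rw [if_neg hne]
          have : (i+1).toNat + (j-1) = i.toNat + j := by omega
          rw [this]; exact h
        calc countNonQ (aStamp (t.set i.toNat '?') (i+1) k) < countNonQ (t.set i.toNat '?') := hlt
          _ ≤ countNonQ t := countNonQ_set_le t i.toNat

theorem aCanLoop_iff (s t : List Char) (i : Int) (js : List Int) (c : Bool) :
    aCanLoop s t i js c = true ↔
      ((∀ j ∈ js, PySem.List.pyGetD t (i + j) '?' = '?' ∨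
          PySem.List.pyGetD t (i + j) '?' = PySem.List.pyGetD s j '?') ∧
       (c = true ∨ ∃ j ∈ js, PySem.List.pyGetD t (i + j) '?' ≠ '?')) := by
  induction js generalizing c with
  | nil => simp [aCanLoop]
  | cons j js ih =>
      simp only [aCanLoop]
      by_cases h1 : PySem.List.pyGetD t (i + j) '?' = '?'
      · rw [if_pos h1, ih]
        simp [h1]
      · rw [if_neg h1]
        by_cases h2 : PySem.List.pyGetD t (i + j) '?' = PySem.List.pyGetD s j '?'
        · rw [if_neg (by simpa using h2), ih]
          simp [h2]
          intro _
          right; left; rw [← h2]; exact h1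
        · rw [if_pos (by simpa using h2)]
          simp [h1, h2]

theorem bCheck_iff (s t : List Char) (i : Int) (n : Nat) (hs : s.length = n) (hi : 0 ≤ i)
    (hin : i.toNat + n ≤ t.length) :
    bCheck s t i n = true ↔
      ((∀ j, j < n → t.getD (i.toNat + j) '?' = '?' ∨ t.getD (i.toNat + j) '?' = s.getD j '?') ∧
       (∃ j, j < n ∧ t.getD (i.toNat + j) '?' ≠ '?')) := by
  have hw : PySem.List.slice t (some i) (some (i + (n : Int))) =
      (t.drop i.toNat).take n := by
    rw [PySem.List.slice_toNat t hi (by omega)]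
    congr 1
    omega
  have hwl : ((t.drop i.toNat).take n).length = n := by
    simp
    omega
  have hwget : ∀ (j : Nat) (hj : j < n), ((t.drop i.toNat).take n)[j]'(by omega) = t[i.toNat + j]'(by omega) := by
    intro j hj
    rw [List.getElem_take, List.getElem_drop]
  simp only [bCheck, hw]
  rw [Bool.and_eq_true, Bool.not_eq_eq_eq_not, Bool.not_true, decide_eq_false_iff_not]
  constructor
  · rintro ⟨hne, hall⟩
    rw [List.all_eq_true] at hall
    constructor
    · intro j hj
      have hmem : (((t.drop i.toNat).take n)[j]'(by omega), s[j]'(by omega)) ∈ ((t.drop i.toNat).take n).zip s := by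
        rw [List.mem_iff_getElem]
        exact ⟨j, by simp [hwl, hs]; omega, by rw [List.getElem_zip]⟩
      have := hall _ hmem
      simp at this
      rw [List.getD_eq_getElem t '?' (by omega), List.getD_eq_getElem s '?' (by omega)]
      exact this
    · by_contra hc
      push Not at hc
      apply hne
      rw [List.eq_replicate_iff]
      refine ⟨hwl, ?_⟩
      intro b hb
      rw [List.mem_iff_getElem] at hb
      obtain ⟨j, hjl, hbe⟩ := hb
      have hj : j < n := by omega
      have := hc j hj
      rw [List.getD_eq_getElem t '?' (by omega)] at this
      rw [← hbe, hwget j hj]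
      simpa using this
  · rintro ⟨hok, ⟨j0, hj0, hne0⟩⟩
    constructor
    · intro hrep
      apply hne0
      have h1 : ((t.drop i.toNat).take n)[j0]'(by omega) = '?' := by simp [hrep]
      rw [List.getD_eq_getElem t '?' (by omega), ← hwget j0 hj0]
      exact h1
    · rw [List.all_eq_true]
      intro p hp
      rw [List.mem_iff_getElem] at hp
      obtain ⟨j, hjl, hpe⟩ := hp
      have hj : j < n := by
        have := List.length_zip (l₁ := (t.drop i.toNat).take n) (l₂ := s)
        omega
      rw [List.getElem_zip] at hpe
      have := hok j hj
      rw [List.getD_eq_getElem t '?' (by omega), List.getD_eq_getElem s '?' (by omega), ← hwget j hj] at this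
      subst hpe
      simpa using this

theorem check_eq_can (s t : List Char) (i : Int) (n : Nat) (hs : s.length = n) (hi : 0 ≤ i)
    (hin : i.toNat + n ≤ t.length) :
    aCanLoop s t i (PySem.List.pyRange 0 (n : Int)) false = bCheck s t i n := by
  have hconv : ∀ j : Nat, j < n → PySem.List.pyGetD t (i + (j : Int)) '?' = t.getD (i.toNat + j) '?' := by
    intro j hj
    rw [PySem.List.pyGetD_of_nonneg t '?' (by omega)]
    congr 1
    omega
  have hconv2 : ∀ j : Nat, PySem.List.pyGetD s (j : Int) '?' = s.getD j '?' := by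
    intro j
    rw [PySem.List.pyGetD_of_nonneg s '?' (by omega)]
    simp
  have h1 := aCanLoop_iff s t i (PySem.List.pyRange 0 (n : Int)) false
  have h2 := bCheck_iff s t i n hs hi hin
  cases ha : aCanLoop s t i (PySem.List.pyRange 0 (n : Int)) false with
  | true =>
      rw [ha] at h1
      symm
      rw [h2]
      obtain ⟨hok, hex⟩ := h1.mp rfl
      constructor
      · intro j hj
        have := hok (j : Int) (by rw [PySem.List.mem_pyRange_one]; omega)
        rw [hconv j hj, hconv2 j] at this
        exact this
      · rcases hex with hc | ⟨j, hjm, hne⟩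
        · simp at hc
        · rw [PySem.List.mem_pyRange_one] at hjm
          refine ⟨j.toNat, by omega, ?_⟩
          have hj' : ((j.toNat : Nat) : Int) = j := by omega
          rw [← hconv j.toNat (by omega), hj']
          exact hne
  | false =>
      rw [ha] at h1
      symm
      rw [← Bool.not_eq_true, h2]
      intro ⟨hok, ⟨j, hj, hne⟩⟩
      have : aCanLoop s t i (PySem.List.pyRange 0 (n : Int)) false = true := by
        rw [aCanLoop_iff]
        constructor
        · intro j' hj'
          rw [PySem.List.mem_pyRange_one] at hj'
          have hj'' : j' = ((j'.toNat : Nat) : Int) := by omega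
          rw [hj'', hconv (j'.toNat) (by omega), hconv2]
          exact hok j'.toNat (by omega)
        · right
          refine ⟨(j : Int), by rw [PySem.List.mem_pyRange_one]; omega, ?_⟩
          rw [hconv j hj]
          exact hne
      rw [ha] at this
      simp at this

theorem splice_getElem? (t : List Char) (i0 n : Nat) (hin : i0 + n ≤ t.length) (p : Nat) :
    (t.take i0 ++ List.replicate n '?' ++ t.drop (i0 + n))[p]? =
      if p < i0 then t[p]? else if p < i0 + n then some '?' else t[p]? := by
  simp [List.getElem?_append, List.getElem?_take, List.getElem?_drop, List.getElem?_replicate]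
  split_ifs <;> first | rfl | (exfalso; omega) | (congr 1; omega)

theorem bSplice_length (t : List Char) (i : Int) (n : Nat) (hin : i.toNat + n ≤ t.length) :
    (bSplice t i n).length = t.length := by
  simp [bSplice]
  omega

theorem bSplice_getD (t : List Char) (i : Int) (n : Nat)
    (hin : i.toNat + n ≤ t.length) (p : Nat) :
    (bSplice t i n).getD p '?' =
      if i.toNat ≤ p ∧ p < i.toNat + n then '?' else t.getD p '?' := by
  rw [List.getD, List.getD, bSplice, splice_getElem? t i.toNat n hin p]
  split_ifs <;> first | rfl | (exfalso; omega)

theorem aStamp_getElem? (t : List Char) (i : Int) (n : Nat) (hi : 0 ≤ i) (p : Nat) :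
    (aStamp t i n)[p]? = if i.toNat ≤ p ∧ p < i.toNat + n ∧ p < t.length then some '?' else t[p]? := by
  induction n generalizing t i with
  | zero => simp [aStamp]; intro h1 h2; omega
  | succ k ih =>
      show (aStamp (t.set i.toNat '?') (i + 1) k)[p]? = _
      rw [ih (t.set i.toNat '?') (i + 1) (by omega)]
      have h1 : (i + 1).toNat = i.toNat + 1 := by omega
      rw [h1]
      simp only [List.length_set, List.getElem?_set]
      split_ifs <;> first | rfl | (exfalso; omega) | (rw [List.getElem?_eq_none (by omega)]; rfl) | (exact (List.getElem?_eq_none (by omega)).symm)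

theorem aStamp_eq_bSplice (t : List Char) (i : Int) (n : Nat) (hi : 0 ≤ i)
    (hin : i.toNat + n ≤ t.length) : aStamp t i n = bSplice t i n := by
  apply List.ext_getElem?
  intro p
  rw [aStamp_getElem? t i n hi p, bSplice, splice_getElem? t i.toNat n hin p]
  split_ifs <;> first | rfl | (exfalso; omega)

theorem bCheck_congr (s t t' : List Char) (k : Int) (n : Nat) (hlen : t'.length = t.length)
    (hag : ∀ j, j < n → t'.getD (k.toNat + j) '?' = t.getD (k.toNat + j) '?')
    (hs : s.length = n) (hk : 0 ≤ k) (hkn : k.toNat + n ≤ t.length) :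
    bCheck s t' k n = bCheck s t k n := by
  have h1 := bCheck_iff s t k n hs hk hkn
  have h2 := bCheck_iff s t' k n hs hk (by omega)
  have hiff : bCheck s t' k n = true ↔ bCheck s t k n = true := by
    rw [h1, h2]
    constructor
    · rintro ⟨hok, j, hj, hne⟩
      exact ⟨fun j hj => by rw [← hag j hj]; exact hok j hj, j, hj, by rw [← hag j hj]; exact hne⟩
    · rintro ⟨hok, j, hj, hne⟩
      exact ⟨fun j hj => by rw [hag j hj]; exact hok j hj, j, hj, by rw [hag j hj]; exact hne⟩
  cases hb : bCheck s t k n with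
  | true => exact hiff.mpr hb
  | false =>
      cases hb' : bCheck s t' k n with
      | false => rfl
      | true => rw [hb] at hiff; simp at hiff; rw [hb'] at hiff; simp at hiff

theorem aPass_measure (s : List Char) (n : Nat) :
    ∀ (js : List Int), (∀ i ∈ js, 0 ≤ i) →
    ∀ (t : List Char) (ans : List Int) (done : Bool),
      countNonQ (aPass s n js (t, ans, done)).1 ≤ countNonQ t ∧
      (done = true → (aPass s n js (t, ans, done)).2.2 = false →
        countNonQ (aPass s n js (t, ans, done)).1 < countNonQ t) := by
  intro js
  induction js with
  | nil => intro _ t ans done; simp [aPass]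
  | cons i is ih =>
      intro hjs t ans done
      have hi : 0 ≤ i := hjs i (by simp)
      rw [aPass]
      by_cases hc : aCanLoop s t i (PySem.List.pyRange 0 (n : Int)) false = true
      · rw [if_pos hc]
        have hex : ∃ j : Nat, j < n ∧ t.getD (i.toNat + j) '?' ≠ '?' := by
          obtain ⟨-, hor⟩ := (aCanLoop_iff s t i _ false).mp hc
          rcases hor with h | ⟨j, hjm, hne⟩
          · simp at h
          · rw [PySem.List.mem_pyRange_one] at hjm
            refine ⟨j.toNat, by omega, ?_⟩
            rw [PySem.List.pyGetD_of_nonneg t '?' (by omega)] at hne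
            have : (i + j).toNat = i.toNat + j.toNat := by omega
            rwa [this] at hne
        obtain ⟨j, hj, hne⟩ := hex
        have hlt : countNonQ (aStamp t i n) < countNonQ t := aStamp_lt t i n j hi hj hne
        have := ih (fun x hx => hjs x (by simp [hx])) (aStamp t i n) (ans ++ [i]) false
        exact ⟨by omega, fun _ _ => by omega⟩
      · rw [if_neg hc]
        exact ih (fun x hx => hjs x (by simp [hx])) t ans done

-- ===== new machinery: A-side decompositions =====

theorem aPass_append (s : List Char) (n : Nat) (js : List Int) :
    ∀ (t : List Char) (ans : List Int) (done : Bool),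
    aPass s n js (t, ans, done) =
      ((aPass s n js (t, [], done)).1, ans ++ (aPass s n js (t, [], done)).2.1,
        (aPass s n js (t, [], done)).2.2) := by
  induction js with
  | nil => intro t ans done; simp [aPass]
  | cons i is ih =>
      intro t ans done
      rw [aPass, aPass]
      by_cases h : aCanLoop s t i (PySem.List.pyRange 0 (n : Int)) false = true
      · rw [if_pos h, if_pos h, ih (aStamp t i n) (ans ++ [i]) false,
          ih (aStamp t i n) ([] ++ [i]) false]
        simp
      · rw [if_neg h, if_neg h, ih t ans done]

theorem aPass_concat (s : List Char) (n : Nat) (js1 js2 : List Int) :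
    ∀ (st : List Char × List Int × Bool),
    aPass s n (js1 ++ js2) st = aPass s n js2 (aPass s n js1 st) := by
  induction js1 with
  | nil => intro st; simp [aPass]
  | cons i is ih =>
      rintro ⟨t, ans, done⟩
      rw [List.cons_append, aPass, aPass]
      split_ifs <;> apply ih

theorem aPass_skip (s : List Char) (n : Nat) (t : List Char) (hs : s.length = n)
    (js : List Int)
    (h : ∀ i ∈ js, 0 ≤ i ∧ i.toNat + n ≤ t.length ∧ bCheck s t i n = false) :
    ∀ (ans : List Int) (done : Bool), aPass s n js (t, ans, done) = (t, ans, done) := by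
  induction js with
  | nil => intro ans done; rfl
  | cons i is ih =>
      intro ans done
      obtain ⟨h1, h2, h3⟩ := h i (by simp)
      rw [aPass, check_eq_can s t i n hs h1 h2, h3]
      simp only [Bool.false_eq_true, if_false]
      exact ih (fun x hx => h x (by simp [hx])) ans done

theorem aLoop_append (s : List Char) (n : Nat) (W : Int) :
    ∀ (f : Nat) (t : List Char) (ans : List Int),
    aLoop s n W f t ans = ((aLoop s n W f t []).1, ans ++ (aLoop s n W f t []).2) := by
  intro f
  induction f with
  | zero => intro t ans; simp [aLoop]
  | succ f ih =>
      intro t ans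
      rw [aLoop, aLoop, aPass_append s n _ t ans true, aPass_append s n _ t [] true]
      rcases hp : aPass s n (PySem.List.pyRange 0 W) (t, [], true) with ⟨t1, a1, d1⟩
      simp only
      cases d1 with
      | true => simp
      | false =>
          simp only [Bool.false_eq_true, if_false, List.nil_append]
          rw [ih t1 (ans ++ a1), ih t1 a1]
          simp

theorem aLoop_succ (s : List Char) (n : Nat) (W : Int) (hpos : ∀ i ∈ PySem.List.pyRange 0 W, 0 ≤ i) :
    ∀ (f : Nat) (t : List Char) (ans : List Int), countNonQ t < f →
    aLoop s n W (f + 1) t ans = aLoop s n W f t ans := by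
  intro f
  induction f with
  | zero => intro t ans h; omega
  | succ f ih =>
      intro t ans h
      rw [aLoop, aLoop]
      rcases hp : aPass s n (PySem.List.pyRange 0 W) (t, ans, true) with ⟨t1, a1, d1⟩
      have hme := aPass_measure s n (PySem.List.pyRange 0 W) hpos t ans true
      rw [hp] at hme
      cases d1 with
      | true => simp
      | false =>
          simp only [Bool.false_eq_true, if_false]
          exact ih t1 a1 (by have h2 := hme.2 rfl rfl; simp at h2; omega)

theorem aLoop_add (s : List Char) (n : Nat) (W : Int) (hpos : ∀ i ∈ PySem.List.pyRange 0 W, 0 ≤ i)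
    (k : Nat) : ∀ (f : Nat) (t : List Char) (ans : List Int), countNonQ t < f →
    aLoop s n W (f + k) t ans = aLoop s n W f t ans := by
  induction k with
  | zero => intro f t ans h; rfl
  | succ k ih =>
      intro f t ans h
      have : f + (k + 1) = (f + k) + 1 := by omega
      rw [this, aLoop_succ s n W hpos (f + k) t ans (by omega), ih f t ans h]

theorem aLoop_irrel (s : List Char) (n : Nat) (W : Int) (hpos : ∀ i ∈ PySem.List.pyRange 0 W, 0 ≤ i)
    (f f' : Nat) (t : List Char) (ans : List Int) (h : countNonQ t < f) (h' : countNonQ t < f') :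
    aLoop s n W f t ans = aLoop s n W f' t ans := by
  obtain ⟨a, rfl⟩ : ∃ a, f = (countNonQ t + 1) + a := ⟨f - (countNonQ t + 1), by omega⟩
  obtain ⟨b, rfl⟩ : ∃ b, f' = (countNonQ t + 1) + b := ⟨f' - (countNonQ t + 1), by omega⟩
  rw [aLoop_add s n W hpos a _ t ans (by omega), aLoop_add s n W hpos b _ t ans (by omega)]

-- A's whole remaining computation from the middle of a pass (proof-side device)
def afin (s : List Char) (n : Nat) (W : Int) (t : List Char) (i0 : Int) (done : Bool) :
    List Char × List Int :=
  match aPass s n (PySem.List.pyRange i0 W) (t, [], done) with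
  | (t1, a1, d1) =>
      if d1 then (t1, a1)
      else ((aLoop s n W (countNonQ t1 + 1) t1 []).1, a1 ++ (aLoop s n W (countNonQ t1 + 1) t1 []).2)

theorem pyRange_zero_pos (W : Int) : ∀ i ∈ PySem.List.pyRange 0 W, 0 ≤ i := by
  intro i hi
  rw [PySem.List.mem_pyRange_one] at hi
  omega

theorem afin_at_zero (s : List Char) (n : Nat) (W : Int) (t : List Char) :
    afin s n W t 0 true = aLoop s n W (countNonQ t + 1) t [] := by
  rw [aLoop]
  rcases hp : aPass s n (PySem.List.pyRange 0 W) (t, [], true) with ⟨t1, a1, d1⟩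
  simp only [afin, hp]
  cases d1 with
  | true => simp
  | false =>
      simp only [Bool.false_eq_true, if_false]
      have hme := aPass_measure s n (PySem.List.pyRange 0 W) (pyRange_zero_pos W) t [] true
      rw [hp] at hme
      have hlt : countNonQ t1 < countNonQ t := hme.2 rfl rfl
      rw [aLoop_append s n W (countNonQ t) t1 a1,
        aLoop_irrel s n W (pyRange_zero_pos W) (countNonQ t) (countNonQ t1 + 1) t1 [] (by omega) (by omega)]

-- ===== B-side basics =====

theorem mem_insSorted (l : List Int) (v x : Int) : x ∈ insSorted l v ↔ x = v ∨ x ∈ l := by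
  induction l with
  | nil => simp [insSorted]
  | cons a as ih =>
      rw [insSorted]
      split_ifs with h
      · simp [ih]; tauto
      · simp

theorem length_insSorted (l : List Int) (v : Int) : (insSorted l v).length = l.length + 1 := by
  induction l with
  | nil => rfl
  | cons a as ih => rw [insSorted]; split_ifs <;> simp [ih]

theorem pairwise_insSorted (l : List Int) (v : Int) (hs : l.Pairwise (· < ·)) (hv : v ∉ l) :
    (insSorted l v).Pairwise (· < ·) := by
  induction l with
  | nil => simp [insSorted]
  | cons a as ih =>
      rw [insSorted]
      rw [List.pairwise_cons] at hs
      split_ifs with h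
      · rw [List.pairwise_cons]
        constructor
        · intro y hy
          rw [mem_insSorted] at hy
          rcases hy with rfl | hy
          · exact h
          · exact hs.1 y hy
        · exact ih hs.2 (by simp at hv; tauto)
      · rw [List.pairwise_cons]
        constructor
        · intro y hy
          have hva : v ≠ a := by simp at hv; tauto
          have hlt : v < a := by omega
          rcases List.mem_cons.mp hy with rfl | hy
          · exact hlt
          · exact lt_trans hlt (hs.1 y hy)
        · rw [List.pairwise_cons]
          exact ⟨hs.1, hs.2⟩

def allQ (t : List Char) (k : Int) (n : Nat) : Prop :=
  ∀ j, j < n → t.getD (k.toNat + j) '?' = '?'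

def matchesS (s t : List Char) (k : Int) (n : Nat) : Prop :=
  ∀ j, j < n → t.getD (k.toNat + j) '?' = '?' ∨ t.getD (k.toNat + j) '?' = s.getD j '?'

theorem allQ_bCheck (s t : List Char) (k : Int) (n : Nat) (hs : s.length = n) (hk : 0 ≤ k)
    (hkn : k.toNat + n ≤ t.length) (h : allQ t k n) : bCheck s t k n = false := by
  cases hb : bCheck s t k n with
  | false => rfl
  | true =>
      obtain ⟨-, j, hj, hne⟩ := (bCheck_iff s t k n hs hk hkn).mp hb
      exact absurd (h j hj) hne

theorem bCheck_matchesS (s t : List Char) (k : Int) (n : Nat) (hs : s.length = n) (hk : 0 ≤ k)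
    (hkn : k.toNat + n ≤ t.length) (h : bCheck s t k n = true) : matchesS s t k n :=
  ((bCheck_iff s t k n hs hk hkn).mp h).1

theorem spliceKeep (t : List Char) (i : Int) (n : Nat) (hin : i.toNat + n ≤ t.length) (p : Nat) :
    (bSplice t i n).getD p '?' = '?' ∨ (bSplice t i n).getD p '?' = t.getD p '?' := by
  rw [bSplice_getD t i n hin p]
  split_ifs <;> tauto

theorem allQ_splice (t : List Char) (i : Int) (n' : Nat) (hin : i.toNat + n' ≤ t.length)
    (k : Int) (n : Nat) (h : allQ t k n) : allQ (bSplice t i n') k n := by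
  intro j hj
  rcases spliceKeep t i n' hin (k.toNat + j) with h1 | h1
  · exact h1
  · rw [h1]; exact h j hj

theorem matchesS_splice (s t : List Char) (i : Int) (n' : Nat) (hin : i.toNat + n' ≤ t.length)
    (k : Int) (n : Nat) (h : matchesS s t k n) : matchesS s (bSplice t i n') k n := by
  intro j hj
  rcases spliceKeep t i n' hin (k.toNat + j) with h1 | h1
  · exact Or.inl h1
  · rw [h1]; exact h j hj

theorem allQ_bSplice_self (t : List Char) (i : Int) (n : Nat) (hin : i.toNat + n ≤ t.length) :
    allQ (bSplice t i n) i n := by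
  intro j hj
  rw [bSplice_getD t i n hin]
  rw [if_pos (by omega)]

theorem countNonQ_bSplice_lt (t : List Char) (i : Int) (n : Nat) (hi : 0 ≤ i)
    (hin : i.toNat + n ≤ t.length) (h : ∃ j, j < n ∧ t.getD (i.toNat + j) '?' ≠ '?') :
    countNonQ (bSplice t i n) < countNonQ t := by
  obtain ⟨j, hj, hne⟩ := h
  rw [← aStamp_eq_bSplice t i n hi hin]
  exact aStamp_lt t i n j hi hj hne

theorem foldl_set_length (l : List Int) (L : List Bool) :
    (l.foldl (fun sch i => sch.set i.toNat true) L).length = L.length := by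
  induction l generalizing L with
  | nil => rfl
  | cons a as ih => rw [List.foldl_cons, ih]; simp

theorem foldl_set_getD (l : List Int) (L : List Bool) (k : Nat) :
    ((l.foldl (fun sch i => sch.set i.toNat true) L).getD k false = true) ↔
      (L.getD k false = true ∨ ∃ i ∈ l, i.toNat = k ∧ k < L.length) := by
  induction l generalizing L with
  | nil => simp
  | cons a as ih =>
      rw [List.foldl_cons, ih, getD_set_eq]
      simp only [List.length_set, List.mem_cons]
      constructor
      · rintro (h | ⟨i, hi, rfl, hlen⟩)
        · split_ifs at h with hc
          · exact Or.inr ⟨a, Or.inl rfl, hc.1.symm, hc.1 ▸ hc.2⟩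
          · exact Or.inl h
        · exact Or.inr ⟨i, Or.inr hi, rfl, hlen⟩
      · rintro (h | ⟨i, hi, rfl, hlen⟩)
        · left; split_ifs with hc
          · rfl
          · exact h
        · rcases hi with rfl | hi
          · left; rw [if_pos ⟨rfl, hlen⟩]
          · exact Or.inr ⟨i, hi, rfl, hlen⟩

-- one stamped window's neighbourhood scan: every invariant survives bPush
theorem bPush_spec (s : List Char) (n m : Nat) (W : Int) (hs : s.length = n)
    (hW : W = (m : Int) - (n : Int) + 1) (t : List Char) (ht : t.length = m) (i : Int) :
    ∀ (vs : List Int) (sch : List Bool) (cur nxt : List Int),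
    (∀ v ∈ vs, 0 ≤ v ∧ v < W) →
    sch.length = W.toNat →
    (∀ k : Int, 0 ≤ k → k < W → bCheck s t k n = true → k ∈ cur ∨ k ∈ nxt ∨ k ∈ vs) →
    (∀ v : Int, v ∈ cur ∨ v ∈ nxt → 0 ≤ v ∧ v < W ∧ sch.getD v.toNat false = true) →
    cur.Pairwise (· < ·) → (∀ v ∈ cur, i < v) →
    nxt.Pairwise (· < ·) → (∀ v ∈ nxt, v ≤ i) →
    (∀ k : Int, 0 ≤ k → k < W → sch.getD k.toNat false = true → k ∉ cur → k ∉ nxt → allQ t k n) →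
    (∀ k : Int, k ∈ cur ∨ k ∈ nxt → matchesS s t k n) →
    ((bPush s t n i vs (sch, cur, nxt)).1.length = W.toNat ∧
     (∀ k : Int, 0 ≤ k → k < W → bCheck s t k n = true →
        k ∈ (bPush s t n i vs (sch, cur, nxt)).2.1 ∨ k ∈ (bPush s t n i vs (sch, cur, nxt)).2.2) ∧
     (∀ v : Int, v ∈ (bPush s t n i vs (sch, cur, nxt)).2.1 ∨ v ∈ (bPush s t n i vs (sch, cur, nxt)).2.2 →
        0 ≤ v ∧ v < W ∧ (bPush s t n i vs (sch, cur, nxt)).1.getD v.toNat false = true) ∧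
     (bPush s t n i vs (sch, cur, nxt)).2.1.Pairwise (· < ·) ∧
     (∀ v ∈ (bPush s t n i vs (sch, cur, nxt)).2.1, i < v) ∧
     (bPush s t n i vs (sch, cur, nxt)).2.2.Pairwise (· < ·) ∧
     (∀ v ∈ (bPush s t n i vs (sch, cur, nxt)).2.2, v ≤ i) ∧
     (∀ k : Int, 0 ≤ k → k < W → (bPush s t n i vs (sch, cur, nxt)).1.getD k.toNat false = true →
        k ∉ (bPush s t n i vs (sch, cur, nxt)).2.1 → k ∉ (bPush s t n i vs (sch, cur, nxt)).2.2 → allQ t k n) ∧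
     (∀ k : Int, k ∈ (bPush s t n i vs (sch, cur, nxt)).2.1 ∨ k ∈ (bPush s t n i vs (sch, cur, nxt)).2.2 →
        matchesS s t k n) ∧
     (bPush s t n i vs (sch, cur, nxt)).2.1.length + (bPush s t n i vs (sch, cur, nxt)).2.2.length ≤
        cur.length + nxt.length + vs.length) := by
  intro vs
  induction vs with
  | nil =>
      intro sch cur nxt h1 h2 h3 h4 h5 h6 h7 h8 h9 h10
      refine ⟨h2, ?_, h4, h5, h6, h7, h8, h9, h10, by simp [bPush]⟩
      intro k hk1 hk2 hk3
      rcases h3 k hk1 hk2 hk3 with h | h | h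
      · exact Or.inl h
      · exact Or.inr h
      · simp at h
  | cons v vs ih =>
      intro sch cur nxt h1 h2 h3 h4 h5 h6 h7 h8 h9 h10
      obtain ⟨hv0, hvW⟩ := h1 v (by simp)
      have hvN : v.toNat < sch.length := by rw [h2]; omega
      have hvran : v.toNat + n ≤ t.length := by rw [ht]; omega
      rw [bPush]
      by_cases hg : sch.getD v.toNat false = false ∧ bCheck s t v n = true
      · rw [if_pos hg]
        have hfresh : v ∉ cur ∧ v ∉ nxt := by
          constructor <;> intro hmem
          · have := (h4 v (Or.inl hmem)).2.2; rw [hg.1] at this; simp at this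
          · have := (h4 v (Or.inr hmem)).2.2; rw [hg.1] at this; simp at this
        have hsetlen : (sch.set v.toNat true).length = sch.length := by simp
        have hgetset : ∀ k : Int, 0 ≤ k → k < W →
            (sch.set v.toNat true).getD k.toNat false =
              if k = v then true else sch.getD k.toNat false := by
          intro k hk0 hkW
          rw [getD_set_eq]
          split_ifs with ha hb hb
          · rfl
          · exact absurd (by omega : k = v) hb
          · exfalso; apply ha; constructor <;> omega
          · rfl
        have hcur' : ∀ x, x ∈ (if i < v then insSorted cur v else cur) ↔
            ((i < v ∧ x = v) ∨ x ∈ cur) := by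
          intro x; split_ifs with h
          · rw [mem_insSorted]; tauto
          · tauto
        have hnxt' : ∀ x, x ∈ (if i < v then nxt else insSorted nxt v) ↔
            ((¬ i < v ∧ x = v) ∨ x ∈ nxt) := by
          intro x; split_ifs with h
          · tauto
          · rw [mem_insSorted]; tauto
        have := ih (sch.set v.toNat true)
          (if i < v then insSorted cur v else cur)
          (if i < v then nxt else insSorted nxt v)
          (fun x hx => h1 x (by simp [hx]))
          (by rw [hsetlen, h2])
          (by
            intro k hk0 hkW hkc
            rcases h3 k hk0 hkW hkc with h | h | h
            · exact Or.inl (by rw [hcur' k]; tauto)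
            · exact Or.inr (by rw [hnxt' k]; tauto)
            · rcases List.mem_cons.mp h with rfl | h
              · by_cases hiv : i < k
                · exact Or.inl (by rw [hcur' k]; tauto)
                · exact Or.inr (by rw [hnxt' k]; tauto)
              · exact Or.inr (Or.inr h))
          (by
            intro x hx
            have hxor : x = v ∨ (x ∈ cur ∨ x ∈ nxt) := by
              rcases hx with hx | hx
              · rw [hcur' x] at hx; tauto
              · rw [hnxt' x] at hx; tauto
            rcases hxor with rfl | hx
            · exact ⟨hv0, hvW, by rw [hgetset x hv0 hvW, if_pos rfl]⟩
            · obtain ⟨hx0, hxW, hxs⟩ := h4 x hx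
              refine ⟨hx0, hxW, ?_⟩
              rw [hgetset x hx0 hxW]
              split_ifs
              · rfl
              · exact hxs)
          (by
            split_ifs with h
            · exact pairwise_insSorted cur v h5 hfresh.1
            · exact h5)
          (by
            intro x hx
            rw [hcur' x] at hx
            rcases hx with ⟨hiv, rfl⟩ | hx
            · exact hiv
            · exact h6 x hx)
          (by
            split_ifs with h
            · exact h7
            · exact pairwise_insSorted nxt v h7 hfresh.2)
          (by
            intro x hx
            rw [hnxt' x] at hx
            rcases hx with ⟨hiv, rfl⟩ | hx
            · omega
            · exact h8 x hx)
          (by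
            intro k hk0 hkW hks hkc hkn
            by_cases hkv : k = v
            · subst hkv
              exfalso
              by_cases hiv : i < k
              · exact hkc (by rw [hcur' k]; tauto)
              · exact hkn (by rw [hnxt' k]; tauto)
            · apply h9 k hk0 hkW
              · rw [hgetset k hk0 hkW, if_neg hkv] at hks; exact hks
              · intro hmem; exact hkc (by rw [hcur' k]; tauto)
              · intro hmem; exact hkn (by rw [hnxt' k]; tauto))
          (by
            intro k hk
            have hxor : k = v ∨ (k ∈ cur ∨ k ∈ nxt) := by
              rcases hk with hk | hk
              · rw [hcur' k] at hk; tauto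
              · rw [hnxt' k] at hk; tauto
            rcases hxor with rfl | hk
            · exact bCheck_matchesS s t k n hs hv0 hvran hg.2
            · exact h10 k hk)
        refine ⟨this.1, this.2.1, this.2.2.1, this.2.2.2.1, this.2.2.2.2.1, this.2.2.2.2.2.1,
          this.2.2.2.2.2.2.1, this.2.2.2.2.2.2.2.1, this.2.2.2.2.2.2.2.2.1, ?_⟩
        have hlen := this.2.2.2.2.2.2.2.2.2
        have hcn : (if i < v then insSorted cur v else cur).length +
            (if i < v then nxt else insSorted nxt v).length = cur.length + nxt.length + 1 := by
          split_ifs <;> simp [length_insSorted] <;> omega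
        simp only [List.length_cons]
        omega
      · rw [if_neg hg]
        have := ih sch cur nxt
          (fun x hx => h1 x (by simp [hx]))
          h2
          (by
            intro k hk0 hkW hkc
            rcases h3 k hk0 hkW hkc with h | h | h
            · exact Or.inl h
            · exact Or.inr (Or.inl h)
            · rcases List.mem_cons.mp h with rfl | h
              · -- guard failed but check is true ⇒ sch[k] is already true ⇒ k must still be queued
                have hstrue : sch.getD k.toNat false = true := by
                  by_cases hb : sch.getD k.toNat false = false
                  · exact absurd ⟨hb, hkc⟩ hg
                  · cases hx : sch.getD k.toNat false
                    · exact absurd hx hb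
                    · rfl
                by_cases hkcur : k ∈ cur
                · exact Or.inl hkcur
                · by_cases hknxt : k ∈ nxt
                  · exact Or.inr (Or.inl hknxt)
                  · exfalso
                    have := allQ_bCheck s t k n hs hk0 (by rw [ht]; omega)
                      (h9 k hk0 hkW hstrue hkcur hknxt)
                    rw [hkc] at this; simp at this
              · exact Or.inr (Or.inr h))
          h4 h5 h6 h7 h8 h9 h10
        refine ⟨this.1, this.2.1, this.2.2.1, this.2.2.2.1, this.2.2.2.2.1, this.2.2.2.2.2.1,
          this.2.2.2.2.2.2.1, this.2.2.2.2.2.2.2.1, this.2.2.2.2.2.2.2.2.1, ?_⟩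
        have hlen := this.2.2.2.2.2.2.2.2.2
        simp only [List.length_cons]
        omega

theorem bCheck_false_allQ (s t : List Char) (k : Int) (n : Nat) (hs : s.length = n) (hk : 0 ≤ k)
    (hkn : k.toNat + n ≤ t.length) (hmatch : matchesS s t k n) (hb : bCheck s t k n = false) :
    allQ t k n := by
  intro j hj
  by_contra hne
  have : bCheck s t k n = true := (bCheck_iff s t k n hs hk hkn).mpr ⟨hmatch, j, hj, hne⟩
  rw [hb] at this
  simp at this

theorem afin_congr_pass (s : List Char) (n : Nat) (W : Int) (t : List Char) (i0 i0' : Int)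
    (done done' : Bool)
    (h : aPass s n (PySem.List.pyRange i0 W) (t, [], done) =
         aPass s n (PySem.List.pyRange i0' W) (t, [], done')) :
    afin s n W t i0 done = afin s n W t i0' done' := by
  unfold afin
  rw [h]

theorem afin_stamp (s : List Char) (n : Nat) (W : Int) (t t2 : List Char) (i0 i : Int) (done : Bool)
    (hpass : aPass s n (PySem.List.pyRange i0 W) (t, [], done) =
             aPass s n (PySem.List.pyRange (i + 1) W) (t2, [i], false)) :
    afin s n W t i0 done =
      ((afin s n W t2 (i + 1) false).1, i :: (afin s n W t2 (i + 1) false).2) := by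
  unfold afin
  rw [hpass, aPass_append s n _ t2 [i] false]
  rcases hq : aPass s n (PySem.List.pyRange (i + 1) W) (t2, [], false) with ⟨p1, p2, pd⟩
  cases pd with
  | true => simp
  | false => simp

-- the heart of the proof: the worklist machine computes A's remaining trace
theorem bRun_eq_afin (s : List Char) (n m : Nat) (W : Int) (hs : s.length = n)
    (hW : W = (m : Int) - (n : Int) + 1) :
    ∀ (fB : Nat) (t : List Char) (sch : List Bool) (cur nxt : List Int) (i0 : Int) (done : Bool)
      (order : List Int),
    t.length = m → sch.length = W.toNat → 0 ≤ i0 →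
    cur.Pairwise (· < ·) → (∀ v ∈ cur, i0 ≤ v ∧ v < W) →
    nxt.Pairwise (· < ·) → (∀ v ∈ nxt, 0 ≤ v ∧ v < i0 ∧ v < W) →
    (∀ k : Int, i0 ≤ k → k < W → bCheck s t k n = true → k ∈ cur) →
    (∀ k : Int, 0 ≤ k → k < i0 → k < W → bCheck s t k n = true → k ∈ nxt) →
    (∀ v : Int, v ∈ cur ∨ v ∈ nxt → sch.getD v.toNat false = true) →
    (∀ k : Int, 0 ≤ k → k < W → sch.getD k.toNat false = true → k ∉ cur → k ∉ nxt → allQ t k n) →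
    (∀ k : Int, k ∈ cur ∨ k ∈ nxt → matchesS s t k n) →
    (done = true → nxt = []) →
    countNonQ t * (2 * n + 3) + cur.length + nxt.length + (if nxt = [] then 0 else 1) + 1 ≤ fB →
    bRun s n W fB t sch cur nxt order =
      ((afin s n W t i0 done).1, order ++ (afin s n W t i0 done).2) := by
  intro fB
  induction fB with
  | zero =>
      intro t sch cur nxt i0 done order _ _ _ _ _ _ _ _ _ _ _ _ _ hf
      omega
  | succ fB ih =>
      intro t sch cur nxt i0 done order ht hsch hi0 hcurS hcurB hnxtS hnxtB hC4 hC5 hC7 hC9 hC10 hC8 hf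
      have hbound : ∀ k : Int, 0 ≤ k → k < W → k.toNat + n ≤ t.length := by
        intro k h1 h2; rw [ht]; omega
      cases cur with
      | nil =>
          have hnopass : ∀ (ans : List Int) (d : Bool),
              aPass s n (PySem.List.pyRange i0 W) (t, ans, d) = (t, ans, d) := by
            intro ans d
            apply aPass_skip s n t hs
            intro k hk
            rw [PySem.List.mem_pyRange_one] at hk
            have hk0 : 0 ≤ k := by omega
            refine ⟨hk0, hbound k hk0 hk.2, ?_⟩
            cases hb : bCheck s t k n with
            | false => rfl
            | true => exact absurd (hC4 k hk.1 hk.2 hb) (by simp)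
          cases nxt with
          | nil =>
              rw [bRun]
              have hall : ∀ (ans : List Int) (d : Bool),
                  aPass s n (PySem.List.pyRange 0 W) (t, ans, d) = (t, ans, d) := by
                intro ans d
                apply aPass_skip s n t hs
                intro k hk
                rw [PySem.List.mem_pyRange_one] at hk
                refine ⟨hk.1, hbound k hk.1 hk.2, ?_⟩
                cases hb : bCheck s t k n with
                | false => rfl
                | true =>
                    rcases lt_or_ge k i0 with hlt | hge
                    · exact absurd (hC5 k hk.1 hlt hk.2 hb) (by simp)
                    · exact absurd (hC4 k hge hk.2 hb) (by simp)
              unfold afin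
              rw [hnopass [] done]
              cases done with
              | true => simp
              | false =>
                  simp only [Bool.false_eq_true, if_false]
                  rw [aLoop, hall [] true]
                  simp
          | cons v vs =>
              have hdone : done = false := by
                cases done with
                | false => rfl
                | true => exact absurd (hC8 rfl) (by simp)
              subst hdone
              rw [bRun]
              have hstep : afin s n W t i0 false = afin s n W t 0 true := by
                unfold afin
                rw [hnopass [] false]
                simp only [Bool.false_eq_true, if_false]
                rcases hq : aPass s n (PySem.List.pyRange 0 W) (t, [], true) with ⟨t1, a1, d1⟩
                rw [aLoop, hq]
                cases d1 with
                | true => simp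
                | false =>
                    simp only [Bool.false_eq_true, if_false]
                    have hme := aPass_measure s n (PySem.List.pyRange 0 W) (pyRange_zero_pos W) t [] true
                    rw [hq] at hme
                    have hlt : countNonQ t1 < countNonQ t := hme.2 rfl rfl
                    rw [aLoop_append s n W (countNonQ t) t1 a1,
                      aLoop_irrel s n W (pyRange_zero_pos W) (countNonQ t) (countNonQ t1 + 1) t1 []
                        (by omega) (by omega)]
                    simp
              rw [hstep]
              apply ih t sch (v :: vs) [] 0 true order ht hsch le_rfl hnxtS
                (fun x hx => ⟨(hnxtB x hx).1, (hnxtB x hx).2.2⟩) List.Pairwise.nil (by simp)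
              · intro k hk0 hkW hkc
                rcases lt_or_ge k i0 with hlt | hge
                · exact hC5 k hk0 hlt hkW hkc
                · exact absurd (hC4 k hge hkW hkc) (by simp)
              · intro k hk0 hk1
                exact absurd hk1 (by omega)
              · intro x hx
                simp only [List.mem_nil_iff, or_false] at hx
                exact hC7 x (Or.inr hx)
              · intro k hk0 hkW hks hkc hkn
                exact hC9 k hk0 hkW hks (by simp) hkc
              · intro k hk
                simp only [List.mem_nil_iff, or_false] at hk
                exact hC10 k (Or.inr hk)
              · intro _; rfl
              · simp only [List.length_nil, List.length_cons] at hf ⊢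
                have : ¬(v :: vs = ([] : List Int)) := by simp
                rw [if_neg this] at hf
                simp
                omega
      | cons i cur' =>
          obtain ⟨hii0, hiW⟩ := hcurB i (by simp)
          have hipos : 0 ≤ i := by omega
          have hins : i.toNat + n ≤ t.length := hbound i hipos hiW
          have hcurtail : ∀ v ∈ cur', i < v := by
            rw [List.pairwise_cons] at hcurS
            exact hcurS.1
          have hprefixfail : ∀ k : Int, i0 ≤ k → k < i → bCheck s t k n = false := by
            intro k hk1 hk2
            cases hb : bCheck s t k n with
            | false => rfl
            | true =>
                have hmem := hC4 k hk1 (by omega) hb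
                rcases List.mem_cons.mp hmem with rfl | hmem
                · omega
                · exact absurd (hcurtail k hmem) (by omega)
          have hskip : ∀ (d : Bool), aPass s n (PySem.List.pyRange i0 W) (t, [], d) =
              aPass s n (PySem.List.pyRange i W) (t, [], d) := by
            intro d
            rw [PySem.List.pyRange_one_append i0 i W (by omega) (by omega), aPass_concat]
            congr 1
            apply aPass_skip s n t hs
            intro k hk
            rw [PySem.List.mem_pyRange_one] at hk
            have hk0 : 0 ≤ k := by omega
            exact ⟨hk0, hbound k hk0 (by omega), hprefixfail k hk.1 hk.2⟩
          have hcons : PySem.List.pyRange i W = i :: PySem.List.pyRange (i + 1) W :=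
            PySem.List.pyRange_one_cons (by omega)
          rw [bRun]
          cases hb : bCheck s t i n with
          | false =>
              simp only [Bool.false_eq_true, if_false]
              have hpass : ∀ (d : Bool), aPass s n (PySem.List.pyRange i0 W) (t, [], d) =
                  aPass s n (PySem.List.pyRange (i + 1) W) (t, [], d) := by
                intro d
                rw [hskip d, hcons, aPass, check_eq_can s t i n hs hipos hins, hb]
                simp
              rw [afin_congr_pass s n W t i0 (i + 1) done done (hpass done)]
              apply ih t sch cur' nxt (i + 1) done order ht hsch (by omega)
                (List.Pairwise.sublist (List.sublist_cons_self i cur') hcurS |>.imp id)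
              · intro v hv
                exact ⟨by have := hcurtail v hv; omega, (hcurB v (by simp [hv])).2⟩
              · exact hnxtS
              · intro v hv
                obtain ⟨h1, h2, h3⟩ := hnxtB v hv
                exact ⟨h1, by omega, h3⟩
              · intro k hk1 hk2 hkc
                have hmem := hC4 k (by omega) hk2 hkc
                rcases List.mem_cons.mp hmem with rfl | hmem
                · omega
                · exact hmem
              · intro k hk0 hk1 hk2 hkc
                rcases lt_or_ge k i0 with hlt | hge
                · exact hC5 k hk0 hlt hk2 hkc
                · have hmem := hC4 k hge hk2 hkc
                  rcases List.mem_cons.mp hmem with rfl | hmem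
                  · rw [hb] at hkc; simp at hkc
                  · exact absurd (hcurtail k hmem) (by omega)
              · intro v hv
                rcases hv with hv | hv
                · exact hC7 v (Or.inl (by simp [hv]))
                · exact hC7 v (Or.inr hv)
              · intro k hk0 hkW hks hkc hkn
                by_cases hki : k = i
                · subst hki
                  exact bCheck_false_allQ s t k n hs hk0 (hbound k hk0 hkW)
                    (hC10 k (Or.inl (by simp))) hb
                · apply hC9 k hk0 hkW hks _ hkn
                  intro hmem
                  rcases List.mem_cons.mp hmem with h | h
                  · exact hki h
                  · exact hkc h
              · intro k hk
                rcases hk with hk | hk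
                · exact hC10 k (Or.inl (by simp [hk]))
                · exact hC10 k (Or.inr hk)
              · exact hC8
              · simp only [List.length_cons] at hf
                omega
          | true =>
              simp only [if_true]
              have hcheckex := (bCheck_iff s t i n hs hipos hins).mp hb
              have hn1 : 1 ≤ n := by
                obtain ⟨-, j, hj, -⟩ := hcheckex
                omega
              set t2 := bSplice t i n with ht2def
              have ht2 : t2.length = m := by rw [ht2def, bSplice_length t i n hins, ht]
              have hcnlt : countNonQ t2 < countNonQ t :=
                countNonQ_bSplice_lt t i n hipos hins hcheckex.2
              set R := PySem.List.pyRange (max 0 (i - (n : Int) + 1)) (min W (i + (n : Int))) with hRdef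
              have hRmem : ∀ v : Int, v ∈ R ↔ (max 0 (i - (n : Int) + 1) ≤ v ∧ v < min W (i + (n : Int))) := by
                intro v; rw [hRdef, PySem.List.mem_pyRange_one]
              have hRlen : R.length ≤ 2 * n := by
                rw [hRdef, PySem.List.length_pyRange_one]
                omega
              -- a window untouched by the stamp keeps its check status
              have hcongr : ∀ k : Int, 0 ≤ k → k < W → k ∉ R →
                  bCheck s t2 k n = bCheck s t k n := by
                intro k hk0 hkW hkR
                rw [hRmem] at hkR
                have hdisj : k ≤ i - n ∨ i + n ≤ k := by omega
                apply bCheck_congr s t t2 k n (by rw [ht2, ht])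
                · intro j hj
                  rw [ht2def, bSplice_getD t i n hins]
                  rw [if_neg (by omega)]
                · exact hs
                · exact hk0
                · exact hbound k hk0 hkW
              rcases hBP : bPush s t2 n i R (sch, cur', nxt) with ⟨sch2, cur2, nxt2⟩
              have hPS := bPush_spec s n m W hs hW t2 ht2 i R sch cur' nxt
                (by intro v hv; rw [hRmem] at hv; omega)
                hsch
                (by
                  intro k hk0 hkW hkc
                  by_cases hkR : k ∈ R
                  · exact Or.inr (Or.inr hkR)
                  · rw [hcongr k hk0 hkW hkR] at hkc
                    rcases lt_or_ge k i0 with hlt | hge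
                    · exact Or.inr (Or.inl (hC5 k hk0 hlt hkW hkc))
                    · have hmem := hC4 k hge hkW hkc
                      rcases List.mem_cons.mp hmem with rfl | hmem
                      · exfalso
                        rw [hRmem] at hkR
                        omega
                      · exact Or.inl hmem)
                (by
                  intro v hv
                  have hv' : v ∈ i :: cur' ∨ v ∈ nxt := by
                    rcases hv with hv | hv
                    · exact Or.inl (by simp [hv])
                    · exact Or.inr hv
                  refine ⟨?_, ?_, ?_⟩
                  · rcases hv with hv | hv
                    · have := hcurtail v hv; omega
                    · exact (hnxtB v hv).1
                  · rcases hv with hv | hv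
                    · exact (hcurB v (by simp [hv])).2
                    · exact (hnxtB v hv).2.2
                  · exact hC7 v hv')
                (List.Pairwise.sublist (List.sublist_cons_self i cur') hcurS |>.imp id)
                hcurtail
                hnxtS
                (by intro v hv; have := (hnxtB v hv).2.1; omega)
                (by
                  intro k hk0 hkW hks hkc hkn
                  by_cases hki : k = i
                  · subst hki
                    exact allQ_bSplice_self t k n hins
                  · apply allQ_splice t i n hins
                    apply hC9 k hk0 hkW hks _ hkn
                    intro hmem
                    rcases List.mem_cons.mp hmem with h | h
                    · exact hki h
                    · exact hkc h)
                (by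
                  intro k hk
                  apply matchesS_splice s t i n hins
                  rcases hk with hk | hk
                  · exact hC10 k (Or.inl (by simp [hk]))
                  · exact hC10 k (Or.inr hk))
              rw [hBP] at hPS
              obtain ⟨hs2len, hcomp2, hmem2, hcur2S, hcur2gt, hnxt2S, hnxt2le, hC9', hC10', hlen2⟩ := hPS
              have hpass : aPass s n (PySem.List.pyRange i0 W) (t, [], done) =
                  aPass s n (PySem.List.pyRange (i + 1) W) (t2, [i], false) := by
                rw [hskip done, hcons, aPass, check_eq_can s t i n hs hipos hins, hb]
                simp only [if_true]
                rw [aStamp_eq_bSplice t i n hipos hins, ← ht2def]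
                simp
              rw [afin_stamp s n W t t2 i0 i done hpass]
              rw [ih t2 sch2 cur2 nxt2 (i + 1) false (order ++ [i]) ht2 hs2len (by omega)
                hcur2S
                (fun v hv => ⟨by have := hcur2gt v hv; omega, (hmem2 v (Or.inl hv)).2.1⟩)
                hnxt2S
                (fun v hv => ⟨(hmem2 v (Or.inr hv)).1, by have := hnxt2le v hv; omega,
                  (hmem2 v (Or.inr hv)).2.1⟩)
                (by
                  intro k hk1 hk2 hkc
                  rcases hcomp2 k (by omega) hk2 hkc with h | h
                  · exact h
                  · exact absurd (hnxt2le k h) (by omega))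
                (by
                  intro k hk0 hk1 hk2 hkc
                  rcases hcomp2 k hk0 hk2 hkc with h | h
                  · exact absurd (hcur2gt k h) (by omega)
                  · exact h)
                (fun v hv => (hmem2 v hv).2.2)
                hC9'
                hC10'
                (by intro h; simp at h)
                ?_]
              · simp
              · -- fuel arithmetic
                have hlen2' : cur2.length + nxt2.length ≤ cur'.length + nxt.length + R.length := by
                  simpa using hlen2
                have hmul : countNonQ t2 * (2 * n + 3) + (2 * n + 3) ≤ countNonQ t * (2 * n + 3) := by
                  have h1 : countNonQ t2 + 1 ≤ countNonQ t := by omega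
                  calc countNonQ t2 * (2 * n + 3) + (2 * n + 3)
                      = (countNonQ t2 + 1) * (2 * n + 3) := by ring
                    _ ≤ countNonQ t * (2 * n + 3) := Nat.mul_le_mul_right _ h1
                have hflag : (if nxt2 = ([] : List Int) then 0 else 1) ≤ 1 := by
                  split_ifs <;> omega
                simp only [List.length_cons] at hf
                omega

theorem replicate_false_getD (N k : Nat) : (List.replicate N false).getD k false = false := by
  rcases lt_or_ge k N with h | h
  · rw [List.getD_eq_getElem _ _ (by simpa using h)]
    simp
  · rw [List.getD, List.getElem?_eq_none (by simpa using h)]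
    rfl

theorem final_eq (stamp target : String) : movesToStamp stamp target = movesToStamp_alt stamp target := by
  simp only [movesToStamp, movesToStamp_alt]
  set s := stamp.toList with hsdef
  set t := target.toList with htdef
  set n := s.length with hndef
  set m := t.length with hmdef
  set W : Int := (m : Int) - (n : Int) + 1 with hWdef
  set cur0 := (PySem.List.pyRange 0 W).filter (fun i => bCheck s t i n) with hcur0
  set sch0 := cur0.foldl (fun sch i => sch.set i.toNat true)
      (List.replicate (max W 0).toNat false) with hsch0
  have hcurmem : ∀ v : Int, v ∈ cur0 ↔ ((0 ≤ v ∧ v < W) ∧ bCheck s t v n = true) := by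
    intro v
    rw [hcur0, List.mem_filter, PySem.List.mem_pyRange_one]
  have hbound : ∀ k : Int, 0 ≤ k → k < W → k.toNat + n ≤ t.length := by
    intro k h1 h2
    omega
  have hrun := bRun_eq_afin s n m W rfl rfl
    (countNonQ t * (2 * n + 3) + cur0.length + 2) t sch0 cur0 [] 0 true []
    rfl
    (by rw [hsch0, foldl_set_length, List.length_replicate]; omega)
    le_rfl
    (List.Pairwise.filter _ (PySem.List.pairwise_lt_pyRange_one 0 W))
    (fun v hv => ((hcurmem v).mp hv).1)
    List.Pairwise.nil
    (by simp)
    (fun k hk1 hk2 hkc => (hcurmem k).mpr ⟨⟨hk1, hk2⟩, hkc⟩)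
    (fun k hk0 hk1 hk2 hkc => absurd hk1 (by omega))
    (by
      intro v hv
      simp only [List.mem_nil_iff, or_false] at hv
      rw [hsch0, foldl_set_getD]
      have hb := (hcurmem v).mp hv
      exact Or.inr ⟨v, hv, rfl, by simp; omega⟩)
    (by
      intro k hk0 hkW hks hkc hkn
      exfalso
      rw [hsch0, foldl_set_getD] at hks
      rcases hks with h | ⟨i, hi, hik, _⟩
      · rw [replicate_false_getD] at h
        simp at h
      · have hib := (hcurmem i).mp hi
        have : i = k := by omega
        subst this
        exact hkc hi)
    (by
      intro k hk
      simp only [List.mem_nil_iff, or_false] at hk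
      have hb := (hcurmem k).mp hk
      exact bCheck_matchesS s t k n rfl hb.1.1 (hbound k hb.1.1 hb.1.2) hb.2)
    (fun _ => rfl)
    (by simp)
  rw [hrun, afin_at_zero s n W t]
  rcases hA : aLoop s n W (countNonQ t + 1) t [] with ⟨tA, ansA⟩
  by_cases hfin : tA = List.replicate m '?'
  · rw [if_neg (by simpa using hfin), if_pos hfin]
    simp
  · rw [if_pos (by simpa using hfin), if_neg hfin]

-- ===== VERDICT (by name: the statement is the Claim_ definition above) =====
theorem movesToStamp_spec : Claim_equal_movesToStamp := by
  intro stamp target _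
  unfold Spec_movesToStamp
  exact final_eq stamp target
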